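-- pv_equiv track=rewrite | github.com/sztanko/elucidario_madeirense | v2/llms/utils.py | create_regex_pattern
-- ===== SOURCE A (Python) =====
-- def create_regex_pattern(search_string: str) -> str:
--     """
--     Converts a string into a regex pattern that matches alphanumeric characters in sequence,
--     allowing any run of non-alphanumeric characters to be matched by a single wildcard block.
--     """
--     result = []
--     last_was_special = False
--
--     for char in search_string:
--         if char.isalnum():
--             result.append(char)
--             last_was_special = False
--         else:
--             if not last_was_special:
--                 result.append('[^a-zA-Z0-9]*')
--                 last_was_special = True
--
--     return ''.join(result)
-- ===== SOURCE B (Python) =====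
-- def create_regex_pattern(search_string: str) -> str:
--     """Run-grouping rewrite: split the string into maximal runs of chars with
--     equal isalnum() status; alnum runs are kept verbatim, each non-alnum run
--     becomes one wildcard block."""
--     parts = []
--     i = 0
--     n = len(search_string)
--     while i < n:
--         k = search_string[i].isalnum()
--         j = i + 1
--         while j < n and search_string[j].isalnum() == k:
--             j += 1
--         parts.append(search_string[i:j] if k else '[^a-zA-Z0-9]*')
--         i = j
--     return ''.join(parts)
-- ===== Notes on version B (the rewrite author's own statement) =====
-- stated objective: alternative
-- what changed: Replaces the per-character loop with a last_was_special flag by run-grouping: the string is split into maximal runs of equal isalnum() status and each run is emitted at once (verbatim or as one wildcard block).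
import Mathlib
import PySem

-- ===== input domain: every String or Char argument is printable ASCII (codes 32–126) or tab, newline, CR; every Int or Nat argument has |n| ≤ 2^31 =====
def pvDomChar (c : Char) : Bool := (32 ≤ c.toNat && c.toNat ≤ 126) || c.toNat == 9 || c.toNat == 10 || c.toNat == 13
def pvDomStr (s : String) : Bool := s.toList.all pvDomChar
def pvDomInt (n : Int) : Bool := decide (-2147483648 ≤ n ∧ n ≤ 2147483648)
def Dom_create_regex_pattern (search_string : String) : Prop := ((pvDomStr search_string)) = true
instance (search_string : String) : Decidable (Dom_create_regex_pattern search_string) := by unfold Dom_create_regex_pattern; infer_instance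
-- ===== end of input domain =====

-- B rewrites A's per-character flag loop as run-grouping (maximal runs of equal isalnum status); alternative decomposition, same cost.

-- ===== PORT A =====
-- A's for-loop over the characters; state = (result list, last_was_special flag)
def pvALoop (cs : List Char) (result : List String) (last_was_special : Bool) : List String :=
  match cs with
  | [] => result
  | c :: rest =>
    if PySem.Chars.isalnum c then
      pvALoop rest (result ++ [String.singleton c]) false
    else
      if !last_was_special then
        pvALoop rest (result ++ ["[^a-zA-Z0-9]*"]) true
      else
        pvALoop rest result last_was_special

def create_regex_pattern (search_string : String) : String :=
  String.join (pvALoop search_string.toList [] false)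

-- ===== PORT B =====
-- B's outer while-loop: one group per maximal run of characters with equal isalnum status
def pvAltGroups : List Char → List String
  | [] => []
  | c :: rest =>
    let k := PySem.Chars.isalnum c
    let run := rest.takeWhile (fun x => PySem.Chars.isalnum x == k)
    let rest' := rest.dropWhile (fun x => PySem.Chars.isalnum x == k)
    (if k then String.ofList (c :: run) else "[^a-zA-Z0-9]*") :: pvAltGroups rest'
termination_by cs => cs.length
decreasing_by
  simp only [List.length_cons]
  exact Nat.lt_succ_of_le (List.length_dropWhile_le _ _)

def create_regex_pattern_alt (search_string : String) : String :=
  String.join (pvAltGroups search_string.toList)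

-- ===== PRECONDITION & SPEC =====
def Spec_create_regex_pattern (search_string : String) (out : String) : Prop := out = create_regex_pattern_alt search_string
instance (search_string : String) (out : String) : Decidable (Spec_create_regex_pattern search_string out) := by unfold Spec_create_regex_pattern; infer_instance

-- ===== CLAIM (what is proved, stated in full; the proofs are below) =====
def Claim_equal_create_regex_pattern : Prop := ∀ (search_string : String), Dom_create_regex_pattern search_string → Spec_create_regex_pattern search_string (create_regex_pattern search_string)

-- ===== LEMMAS AND PROOFS =====

-- proof-only abstraction: the remaining output of A's loop from a given flag state
def pvG (last : Bool) : List Char → String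
  | [] => ""
  | c :: rest =>
    if PySem.Chars.isalnum c then String.singleton c ++ pvG false rest
    else if last then pvG true rest
    else "[^a-zA-Z0-9]*" ++ pvG true rest

theorem join_concat (r : List String) (x : String) :
    String.join (r ++ [x]) = String.join r ++ x := by
  simp [String.join, List.foldl_append]

theorem join_cons (s : String) (l : List String) :
    String.join (s :: l) = s ++ String.join l := by
  apply String.ext; simp [String.toList_join]

theorem aLoop_join (cs : List Char) : ∀ (r : List String) (last : Bool),
    String.join (pvALoop cs r last) = String.join r ++ pvG last cs := by
  induction cs with
  | nil => intro r last; simp [pvALoop, pvG]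
  | cons c rest ih =>
    intro r last
    by_cases h : PySem.Chars.isalnum c = true
    · simp only [pvALoop, pvG, h, if_pos]
      rw [ih, join_concat, String.append_assoc]
    · cases last with
      | false => simp [pvALoop, pvG, h, ih, join_concat, String.append_assoc]
      | true => simp [pvALoop, pvG, h, ih]

theorem pvG_skip_true (run : List Char) (h : ∀ x ∈ run, PySem.Chars.isalnum x = false) :
    ∀ rest, pvG true (run ++ rest) = pvG true rest := by
  induction run with
  | nil => intro rest; rfl
  | cons c cs ih =>
    intro rest
    have hc := h c (by simp)
    simp only [List.cons_append, pvG, hc, Bool.false_eq_true, if_pos]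
    exact ih (fun x hx => h x (by simp [hx])) rest

theorem pvG_alnum_run (run : List Char) (h : ∀ x ∈ run, PySem.Chars.isalnum x = true) :
    ∀ rest, pvG false (run ++ rest) = String.ofList run ++ pvG false rest := by
  induction run with
  | nil =>
    intro rest
    apply String.ext; simp
  | cons c cs ih =>
    intro rest
    have hc := h c (by simp)
    simp only [List.cons_append, pvG, hc, if_pos]
    rw [ih (fun x hx => h x (by simp [hx])) rest, ← String.append_assoc]
    congr 1
    apply String.ext; simp

theorem pvG_true_eq_false (cs : List Char)
    (h : cs = [] ∨ ∃ c rest, cs = c :: rest ∧ PySem.Chars.isalnum c = true) :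
    pvG true cs = pvG false cs := by
  rcases h with h | ⟨c, rest, rfl, hc⟩
  · subst h; rfl
  · simp [pvG, hc]

theorem pvG_eq_altGroups (cs : List Char) :
    pvG false cs = String.join (pvAltGroups cs) := by
  induction cs using pvAltGroups.induct with
  | case1 => simp [pvAltGroups, pvG, String.join]
  | case2 c rest kk rr ih =>
    have ih' : pvG false (rest.dropWhile (fun x => PySem.Chars.isalnum x == PySem.Chars.isalnum c)) =
        String.join (pvAltGroups (rest.dropWhile (fun x => PySem.Chars.isalnum x == PySem.Chars.isalnum c))) := ih
    clear ih
    have hd : rest.takeWhile (fun x => PySem.Chars.isalnum x == PySem.Chars.isalnum c) ++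
        rest.dropWhile (fun x => PySem.Chars.isalnum x == PySem.Chars.isalnum c) = rest :=
      List.takeWhile_append_dropWhile
    set run := rest.takeWhile (fun x => PySem.Chars.isalnum x == PySem.Chars.isalnum c) with hrundef
    set rest' := rest.dropWhile (fun x => PySem.Chars.isalnum x == PySem.Chars.isalnum c) with hrestdef
    have hrun : ∀ x ∈ run, PySem.Chars.isalnum x = PySem.Chars.isalnum c := by
      intro x hx
      have := List.mem_takeWhile_imp (hrundef ▸ hx)
      simpa using this
    have hcons : c :: rest = (c :: run) ++ rest' := by
      simp [hd]
    simp only [pvAltGroups, join_cons]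
    by_cases hc : PySem.Chars.isalnum c = true
    · rw [if_pos hc]
      rw [hcons, List.cons_append, ← List.cons_append, pvG_alnum_run (c :: run)
        (by intro x hx; rcases List.mem_cons.1 hx with rfl | hx
            · exact hc
            · rw [hrun x hx, hc]) rest', ih']
    · have hcf : PySem.Chars.isalnum c = false := by simpa using hc
      rw [if_neg hc]
      have hstep : pvG false (c :: rest) = "[^a-zA-Z0-9]*" ++ pvG true rest := by
        simp [pvG, hcf]
      rw [hstep]
      have hrest : rest = run ++ rest' := by simp [hd]
      rw [hrest, pvG_skip_true run (fun x hx => by rw [hrun x hx, hcf]) rest']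
      have htf : pvG true rest' = pvG false rest' := by
        apply pvG_true_eq_false
        cases hr : rest' with
        | nil => exact Or.inl rfl
        | cons d ds =>
          refine Or.inr ⟨d, ds, rfl, ?_⟩
          have hne : rest.dropWhile (fun x => PySem.Chars.isalnum x == PySem.Chars.isalnum c) ≠ [] := by
            rw [← hrestdef, hr]; simp
          have := List.head_dropWhile_not (fun x => PySem.Chars.isalnum x == PySem.Chars.isalnum c) hne
          rw [show (rest.dropWhile (fun x => PySem.Chars.isalnum x == PySem.Chars.isalnum c)).head hne = d from by
            simp [← hrestdef, hr]] at this
          simp only [beq_eq_false_iff_ne, ne_eq] at this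
          cases hdx : PySem.Chars.isalnum d with
          | true => rfl
          | false => exact absurd (by rw [hdx, hcf]) this
      rw [htf, ih', ← hrest, ← hrestdef]

-- ===== VERDICT (by name: the statement is the Claim_ definition above) =====
theorem create_regex_pattern_spec : Claim_equal_create_regex_pattern := by
  intro s _
  unfold Spec_create_regex_pattern create_regex_pattern create_regex_pattern_alt
  rw [aLoop_join, pvG_eq_altGroups]
  apply String.ext; simp [String.toList_join]
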